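-- pv_equiv track=rewrite | github.com/mmakaay/adventofcode2024 | 19_Linen_Layout/part2.py | count_total_arrangements
-- ===== SOURCE A (Python) =====
-- from functools import cache
--
-- def count_total_arrangements(scenario):
--     @cache
--     def count_possible_arrangements(design, count=0):
--         if design == "":
--             return count + 1
--         for i in range(1, min(max_pattern_length, len(design)) + 1):
--             chunk = design[:i]
--             remainder = design[i:]
--             if chunk in patterns:
--                 count += count_possible_arrangements(remainder)
--         return count
--
--     patterns, max_pattern_length, designs = scenario
--     return sum(count_possible_arrangements(design) for design in designs)
-- ===== SOURCE B (Python) =====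
-- def count_total_arrangements(scenario):
--     patterns, max_pattern_length, designs = scenario
--     pats = set(patterns)
--     total = 0
--     for design in designs:
--         n = len(design)
--         ways = [1]  # ways[k] == number of arrangements of design[i+k:]
--         for i in range(n - 1, -1, -1):
--             here = 0
--             for L in range(1, min(max_pattern_length, n - i) + 1):
--                 if design[i:i + L] in pats:
--                     here += ways[L - 1]
--             ways = [here] + ways
--         total += ways[0]
--     return total
-- ===== Notes on version B (the rewrite author's own statement) =====
-- stated objective: alternative
-- what changed: Replaces the memoized top-down recursion (@cache helper recursing on suffix strings) with an explicit bottom-up suffix DP: a ways table built back-to-front per design, ways[i] = sum of ways[i+L] over matching chunks.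
import Mathlib
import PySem

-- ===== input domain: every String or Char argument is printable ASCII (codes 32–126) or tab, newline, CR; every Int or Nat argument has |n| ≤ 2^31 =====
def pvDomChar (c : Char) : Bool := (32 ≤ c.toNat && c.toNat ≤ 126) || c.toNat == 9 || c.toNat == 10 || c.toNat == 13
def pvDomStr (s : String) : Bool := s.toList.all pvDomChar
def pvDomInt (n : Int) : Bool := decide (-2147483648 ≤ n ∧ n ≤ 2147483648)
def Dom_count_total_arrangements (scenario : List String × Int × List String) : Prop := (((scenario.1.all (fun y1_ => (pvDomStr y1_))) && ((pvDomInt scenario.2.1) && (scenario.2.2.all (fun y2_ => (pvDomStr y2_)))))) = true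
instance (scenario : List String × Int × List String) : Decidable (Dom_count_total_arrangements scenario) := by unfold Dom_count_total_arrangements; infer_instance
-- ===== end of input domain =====

-- B replaces A's memoized top-down recursion with a bottom-up suffix DP (ways table built
-- back-to-front per design); alternative decomposition, same results.

-- ===== PORT A =====
-- A's cached recursive helper; `fuel` (= initial suffix length) only makes the recursion
-- structural — with fuel ≥ d.length it is never exhausted (the @cache affects speed only).
def countPossibleA (ps : List (List Char)) (mpl : Int) : Nat → List Char → Int
  | fuel, d =>
    if d = [] then 0 + 1
    else
      match fuel with
      | 0 => 0  -- unreachable when fuel ≥ d.length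
      | f + 1 =>
        (PySem.List.pyRange 1 (min mpl (d.length : Int) + 1) 1).foldl
          (fun count i =>
            if d.take i.toNat ∈ ps then count + countPossibleA ps mpl f (d.drop i.toNat)
            else count) 0

def count_total_arrangements (scenario : List String × Int × List String) : Int :=
  match scenario with
  | (patterns, max_pattern_length, designs) =>
    let ps := patterns.map String.toList
    designs.foldl (fun acc design =>
      acc + countPossibleA ps max_pattern_length design.toList.length design.toList) 0

-- ===== PORT B =====
-- B's ways table for a suffix d: waysB d[k] = number of arrangements of d.drop k
-- (Source B builds it back-to-front by prepending; the structural recursion is that prepend loop).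
def waysB (pats : PySem.Set (List Char)) (mpl : Int) : List Char → List Int
  | [] => [1]
  | c :: rest =>
    let ws := waysB pats mpl rest
    let here :=
      (PySem.List.pyRange 1 (min mpl ((c :: rest).length : Int) + 1) 1).foldl
        (fun acc L =>
          if (c :: rest).take L.toNat ∈ pats then acc + PySem.List.pyGetD ws (L - 1) 0
          else acc) 0
    here :: ws

def count_total_arrangements_alt (scenario : List String × Int × List String) : Int :=
  match scenario with
  | (patterns, max_pattern_length, designs) =>
    let pats := PySem.Set.ofList (patterns.map String.toList)
    designs.foldl (fun total design =>
      total + (waysB pats max_pattern_length design.toList).headD 0) 0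

-- ===== PRECONDITION & SPEC =====
def Spec_count_total_arrangements (scenario : List String × Int × List String) (out : Int) : Prop := out = count_total_arrangements_alt scenario
instance (scenario : List String × Int × List String) (out : Int) : Decidable (Spec_count_total_arrangements scenario out) := by unfold Spec_count_total_arrangements; infer_instance

-- ===== CLAIM (what is proved, stated in full; the proofs are below) =====
def Claim_equal_count_total_arrangements : Prop := ∀ (scenario : List String × Int × List String), Dom_count_total_arrangements scenario → Spec_count_total_arrangements scenario (count_total_arrangements scenario)

-- ===== LEMMAS AND PROOFS =====

theorem length_waysB (pats : PySem.Set (List Char)) (mpl : Int) (d : List Char) :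
    (waysB pats mpl d).length = d.length + 1 := by
  induction d with
  | nil => simp [waysB]
  | cons c rest ih => simp [waysB, ih]

theorem drop_waysB (pats : PySem.Set (List Char)) (mpl : Int) :
    ∀ (d : List Char) (k : Nat), k ≤ d.length →
      (waysB pats mpl d).drop k = waysB pats mpl (d.drop k) := by
  intro d
  induction d with
  | nil =>
    intro k hk
    have hk0 : k = 0 := Nat.le_zero.mp (by simpa using hk)
    subst hk0; simp
  | cons c rest ih =>
    intro k hk
    cases k with
    | zero => simp
    | succ k =>
      simp only [waysB, List.drop_succ_cons]
      exact ih k (by simpa using hk)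

theorem countA_eq_waysB (ps : List (List Char)) (mpl : Int) :
    ∀ (fuel : Nat) (d : List Char), d.length ≤ fuel →
      countPossibleA ps mpl fuel d =
        (waysB (PySem.Set.ofList ps) mpl d).headD 0 := by
  intro fuel
  induction fuel with
  | zero =>
    intro d hd
    have : d = [] := List.eq_nil_of_length_eq_zero (Nat.le_zero.mp hd)
    subst this
    simp [countPossibleA, waysB]
  | succ f ih =>
    intro d hd
    cases d with
    | nil => simp [countPossibleA, waysB]
    | cons c rest =>
      have hcons : countPossibleA ps mpl (f + 1) (c :: rest) =
          (PySem.List.pyRange 1 (min mpl ((c :: rest).length : Int) + 1) 1).foldl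
            (fun count i =>
              if (c :: rest).take i.toNat ∈ ps then
                count + countPossibleA ps mpl f ((c :: rest).drop i.toNat)
              else count) 0 := by
        rw [countPossibleA]; simp
      rw [hcons]
      have hhead : (waysB (PySem.Set.ofList ps) mpl (c :: rest)).headD 0 =
          (PySem.List.pyRange 1 (min mpl ((c :: rest).length : Int) + 1) 1).foldl
            (fun acc L =>
              if (c :: rest).take L.toNat ∈ PySem.Set.ofList ps then
                acc + PySem.List.pyGetD (waysB (PySem.Set.ofList ps) mpl rest) (L - 1) 0
              else acc) 0 := by
        rw [waysB]; simp
      rw [hhead]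
      apply PySem.List.foldl_congr_mem
      intro acc L hL
      have hLb : 1 ≤ L ∧ L < min mpl ((c :: rest).length : Int) + 1 :=
        (PySem.List.mem_pyRange_one).mp hL
      have hL1 : 1 ≤ L := hLb.1
      have hLn : L ≤ ((c :: rest).length : Int) := by
        have := hLb.2
        omega
      have hln : (c :: rest).length = rest.length + 1 := by simp
      -- membership conditions coincide
      simp only [PySem.Set.mem_ofList]
      by_cases hmem : (c :: rest).take L.toNat ∈ ps
      · simp only [hmem, if_pos]
        congr 1
        -- pyGetD (waysB rest) (L-1) 0 = countPossibleA f ((c::rest).drop L.toNat)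
        have hwslen : (waysB (PySem.Set.ofList ps) mpl rest).length = rest.length + 1 :=
          length_waysB _ _ _
        have h0 : (0 : Int) ≤ L - 1 := by omega
        have h1 : L - 1 < ((waysB (PySem.Set.ofList ps) mpl rest).length : Int) := by
          rw [hwslen]; push_cast; omega
        rw [PySem.List.pyGetD_eq_getElem _ _ h0 h1]
        have hkle : (L - 1).toNat ≤ rest.length := by omega
        have hgd : (waysB (PySem.Set.ofList ps) mpl rest)[(L - 1).toNat] =
            ((waysB (PySem.Set.ofList ps) mpl rest).drop (L - 1).toNat).headD 0 := by
          have hlt : (L - 1).toNat < (waysB (PySem.Set.ofList ps) mpl rest).length := by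
            omega
          rw [List.headD_eq_head?, List.head?_drop, List.getElem?_eq_getElem hlt,
            Option.getD_some]
        rw [hgd, drop_waysB _ _ _ _ hkle]
        have hdrop : rest.drop (L - 1).toNat = (c :: rest).drop L.toNat := by
          have : L.toNat = (L - 1).toNat + 1 := by omega
          rw [this, List.drop_succ_cons]
        rw [hdrop]
        exact ih ((c :: rest).drop L.toNat) (by simp; omega)
      · simp only [hmem, if_neg, not_false_iff]

theorem per_design (patterns : List String) (mpl : Int) (design : String) :
    countPossibleA (patterns.map String.toList) mpl design.toList.length design.toList =
      (waysB (PySem.Set.ofList (patterns.map String.toList)) mpl design.toList).headD 0 :=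
  countA_eq_waysB _ _ _ _ (le_refl _)

-- ===== VERDICT (by name: the statement is the Claim_ definition above) =====
theorem count_total_arrangements_spec : Claim_equal_count_total_arrangements := by
  intro scenario _
  obtain ⟨patterns, mpl, designs⟩ := scenario
  unfold Spec_count_total_arrangements count_total_arrangements count_total_arrangements_alt
  simp only [per_design]
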